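-- pv_equiv track=rewrite | github.com/jin-develop/algorithm | 프로그래머스/기능개발.py | solution
-- ===== SOURCE A (Python) =====
-- def solution(progresses, speeds):
--     answer = []
--     days = []
--     for i in range(len(speeds)):
--         day = (100 - progresses[i]) // speeds[i]
--         day_rest = (100 - progresses[i]) % speeds[i]
--         if day_rest != 0:
--             days.append(day+1)
--         else:
--             days.append(day)
--     rest = []
--     rest.append(days[0])
--     k = 0
--     z = 1
--     for j in range(1,len(days)):
--         if days[j] <= rest[k]:
--             days[j] = rest[k]
--         else:
--             rest.append(days[j])
--             k += 1
--
--
--     sor = sorted(set(days))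
--
--     for m in sor:
--         answer.append(days.count(m))
--
--     return answer
-- ===== SOURCE B (Python) =====
-- def solution(progresses, speeds):
--     days = [(100 - p) // s + (1 if (100 - p) % s != 0 else 0)
--             for p, s in zip(progresses, speeds)]
--     answer = []
--     lead = days[0]
--     count = 0
--     for d in days:
--         if d <= lead:
--             count += 1
--         else:
--             answer.append(count)
--             lead = d
--             count = 1
--     answer.append(count)
--     return answer
-- ===== Notes on version B (the rewrite author's own statement) =====
-- stated objective: simpler
-- what changed: B drops A's rest-list simulation plus the final sorted(set(days))/days.count counting phase and instead emits each deployment batch size directly in one forward greedy pass over the day list (built with zip instead of index loops).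
-- outside the precondition, e.g. on solution([], []): A raises IndexError, B raises IndexError; on solution([50], [0]): A raises ZeroDivisionError, B raises ZeroDivisionError; on solution([50], [1, 1]): A raises IndexError, B returns [1]
import Mathlib
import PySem

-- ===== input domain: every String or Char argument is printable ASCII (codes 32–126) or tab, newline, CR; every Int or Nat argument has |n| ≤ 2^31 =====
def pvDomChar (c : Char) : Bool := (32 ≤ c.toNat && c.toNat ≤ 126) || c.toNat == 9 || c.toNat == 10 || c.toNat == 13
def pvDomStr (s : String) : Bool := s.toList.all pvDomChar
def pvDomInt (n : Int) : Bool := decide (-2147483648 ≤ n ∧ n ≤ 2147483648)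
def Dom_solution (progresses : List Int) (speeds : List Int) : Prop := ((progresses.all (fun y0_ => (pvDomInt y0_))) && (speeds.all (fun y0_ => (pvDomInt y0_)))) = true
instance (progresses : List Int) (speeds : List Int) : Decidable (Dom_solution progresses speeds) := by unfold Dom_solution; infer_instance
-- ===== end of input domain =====

-- B replaces A's rest-list simulation plus sorted/set/count counting phase by a single
-- forward greedy pass that emits each batch size directly (simpler, one pass, no sorting).

-- ===== PORT A =====
-- pyGetD with default 0 is exact here because Pre_solution keeps every index in range
-- (nonempty speeds, progresses at least as long) and excludes zero speeds (ZeroDivisionError).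
def solution (progresses : List Int) (speeds : List Int) : List Int :=
  let days := (PySem.List.pyRange 0 speeds.length 1).foldl (fun days i =>
    let day := PySem.Int.floordiv (100 - PySem.List.pyGetD progresses i 0) (PySem.List.pyGetD speeds i 0)
    let dayRest := PySem.Int.mod (100 - PySem.List.pyGetD progresses i 0) (PySem.List.pyGetD speeds i 0)
    if dayRest ≠ 0 then days ++ [day + 1] else days ++ [day]) []
  let rest : List Int := [] ++ [PySem.List.pyGetD days 0 0]
  let st := (PySem.List.pyRange 1 days.length 1).foldl
    (fun (st : List Int × List Int × Int) j =>
      if PySem.List.pyGetD st.1 j 0 ≤ PySem.List.pyGetD st.2.1 st.2.2 0 then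
        (PySem.List.pySetD st.1 j (PySem.List.pyGetD st.2.1 st.2.2 0), st.2.1, st.2.2)
      else
        (st.1, st.2.1 ++ [PySem.List.pyGetD st.1 j 0], st.2.2 + 1))
    (days, rest, 0)
  let sor := PySem.List.sorted (PySem.Set.ofList st.1) (fun x => x) false
  sor.foldl (fun answer m => answer ++ [(PySem.List.count st.1 m : Int)]) []

-- ===== PORT B =====
-- 'lead = days[0]' raises IndexError in Python on empty input; Pre_solution excludes it,
-- so the total pyGetD with default 0 is exact on the admitted domain.
def solution_alt (progresses : List Int) (speeds : List Int) : List Int :=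
  let days := (progresses.zip speeds).map (fun ps =>
    PySem.Int.floordiv (100 - ps.1) ps.2 +
      (if PySem.Int.mod (100 - ps.1) ps.2 ≠ 0 then 1 else 0))
  let st := days.foldl
    (fun (st : List Int × Int × Int) d =>
      if d ≤ st.2.1 then (st.1, st.2.1, st.2.2 + 1)
      else (st.1 ++ [st.2.2], d, 1))
    ([], PySem.List.pyGetD days 0 0, 0)
  st.1 ++ [st.2.2]

-- ===== PRECONDITION & SPEC =====
-- Pre_ excludes exactly where Python A raises: empty speeds (IndexError at days[0]),
-- a zero speed (ZeroDivisionError), speeds longer than progresses (IndexError).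
def Pre_solution (progresses : List Int) (speeds : List Int) : Prop :=
  speeds ≠ [] ∧ speeds.length ≤ progresses.length ∧ ∀ s ∈ speeds, s ≠ 0
instance (progresses : List Int) (speeds : List Int) : Decidable (Pre_solution progresses speeds) := by
  unfold Pre_solution; infer_instance
def pvWitness_solution : List Int × List Int := ([93, 30, 55], [1, 30, 5])
def Spec_solution (progresses : List Int) (speeds : List Int) (out : List Int) : Prop := out = solution_alt progresses speeds
instance (progresses : List Int) (speeds : List Int) (out : List Int) : Decidable (Spec_solution progresses speeds out) := by unfold Spec_solution; infer_instance

-- ===== CLAIM (what is proved, stated in full; the proofs are below) =====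
def Claim_equal_solution : Prop := ∀ (progresses : List Int) (speeds : List Int), Dom_solution progresses speeds → Pre_solution progresses speeds → Spec_solution progresses speeds (solution progresses speeds)

-- ===== LEMMAS AND PROOFS =====

-- running maximum of the day list: the value A's mutation loop leaves at each position
def runmax (l : Int) : List Int → List Int
  | [] => []
  | d :: ds => if d ≤ l then l :: runmax l ds else d :: runmax d ds

-- the strictly increasing batch leaders: the values A appends to 'rest'
def leaders (l : Int) : List Int → List Int
  | [] => []
  | d :: ds => if d ≤ l then leaders l ds else d :: leaders d ds

-- B's greedy pass as a recursion (B's foldl unrolls to this)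
def greB (ans : List Int) (l c : Int) : List Int → List Int
  | [] => ans ++ [c]
  | d :: ds => if d ≤ l then greB ans l (c + 1) ds else greB (ans ++ [c]) d 1 ds

theorem leaders_gt : ∀ (ds : List Int) (l x : Int), x ∈ leaders l ds → l < x := by
  intro ds
  induction ds with
  | nil => intro l x h; simp [leaders] at h
  | cons d ds ih =>
    intro l x h
    by_cases hd : d ≤ l
    · rw [leaders, if_pos hd] at h; exact ih l x h
    · rw [leaders, if_neg hd] at h
      rcases List.mem_cons.mp h with h | h
      · subst h; omega
      · have := ih d x h; omega

theorem runmax_ge : ∀ (ds : List Int) (l x : Int), x ∈ runmax l ds → l ≤ x := by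
  intro ds
  induction ds with
  | nil => intro l x h; simp [runmax] at h
  | cons d ds ih =>
    intro l x h
    by_cases hd : d ≤ l
    · rw [runmax, if_pos hd] at h
      rcases List.mem_cons.mp h with h | h
      · omega
      · exact ih l x h
    · rw [runmax, if_neg hd] at h
      rcases List.mem_cons.mp h with h | h
      · omega
      · have := ih d x h; omega

theorem pairwise_leaders : ∀ (ds : List Int) (l : Int), (l :: leaders l ds).Pairwise (· < ·) := by
  intro ds
  induction ds with
  | nil => intro l; simp [leaders]
  | cons d ds ih =>
    intro l
    by_cases hd : d ≤ l
    · rw [leaders, if_pos hd]; exact ih l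
    · rw [leaders, if_neg hd]
      refine List.Pairwise.cons ?_ (ih d)
      intro x hx
      rcases List.mem_cons.mp hx with h | h
      · omega
      · have := leaders_gt ds d x h; omega

theorem mem_runmax_leaders : ∀ (ds : List Int) (l x : Int),
    (x = l ∨ x ∈ runmax l ds) ↔ (x = l ∨ x ∈ leaders l ds) := by
  intro ds
  induction ds with
  | nil => intro l x; simp [runmax, leaders]
  | cons d ds ih =>
    intro l x
    by_cases hd : d ≤ l
    · rw [runmax, if_pos hd, leaders, if_pos hd]
      simp only [List.mem_cons]
      have := ih l x; tauto
    · rw [runmax, if_neg hd, leaders, if_neg hd]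
      simp only [List.mem_cons]
      have := ih d x; tauto

theorem greB_eq : ∀ (ds : List Int) (ans : List Int) (l c : Int),
    greB ans l c ds =
      ans ++ (c + (List.count l (runmax l ds) : Int)) ::
        (leaders l ds).map (fun m => (List.count m (runmax l ds) : Int)) := by
  intro ds
  induction ds with
  | nil => intro ans l c; simp [greB, runmax, leaders]
  | cons d ds ih =>
    intro ans l c
    by_cases hd : d ≤ l
    · rw [greB, if_pos hd, ih, runmax, if_pos hd, leaders, if_pos hd]
      congr 2
      · rw [List.count_cons_self]; push_cast; ring
      · apply List.map_congr_left
        intro m hm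
        have h := leaders_gt ds l m hm
        rw [List.count_cons_of_ne (by omega)]
    · rw [greB, if_neg hd, ih, runmax, if_neg hd, leaders, if_neg hd]
      have hnotmem : l ∉ d :: runmax d ds := by
        intro h
        rcases List.mem_cons.mp h with h | h
        · omega
        · have := runmax_ge ds d l h; omega
      rw [List.append_assoc]
      congr 1
      rw [List.singleton_append]
      congr 1
      · rw [List.count_eq_zero.mpr hnotmem]; push_cast; ring
      · rw [List.map_cons]
        congr 1
        · rw [List.count_cons_self]; push_cast; ring
        · apply List.map_congr_left
          intro m hm
          have := leaders_gt ds d m hm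
          rw [List.count_cons_of_ne (by omega)]

theorem foldB_eq : ∀ (ds : List Int) (ans : List Int) (l c : Int),
    (ds.foldl (fun (st : List Int × Int × Int) d =>
        if d ≤ st.2.1 then (st.1, st.2.1, st.2.2 + 1)
        else (st.1 ++ [st.2.2], d, 1)) (ans, l, c)).1 ++
      [(ds.foldl (fun (st : List Int × Int × Int) d =>
        if d ≤ st.2.1 then (st.1, st.2.1, st.2.2 + 1)
        else (st.1 ++ [st.2.2], d, 1)) (ans, l, c)).2.2] = greB ans l c ds := by
  intro ds
  induction ds with
  | nil => intro ans l c; simp [greB]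
  | cons d ds ih =>
    intro ans l c
    rw [List.foldl_cons]
    by_cases hd : d ≤ l
    · have hstep : (if d ≤ ((ans, l, c) : List Int × Int × Int).2.1
          then ((ans, l, c).1, (ans, l, c).2.1, (ans, l, c).2.2 + 1)
          else ((ans, l, c).1 ++ [(ans, l, c).2.2], d, 1)) = (ans, l, c + 1) := by
        simp [hd]
      rw [hstep, ih, greB, if_pos hd]
    · have hstep : (if d ≤ ((ans, l, c) : List Int × Int × Int).2.1
          then ((ans, l, c).1, (ans, l, c).2.1, (ans, l, c).2.2 + 1)
          else ((ans, l, c).1 ++ [(ans, l, c).2.2], d, 1)) = (ans ++ [c], d, 1) := by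
        simp [hd]
      rw [hstep, ih, greB, if_neg hd]

theorem loopA_eq : ∀ (ds pre r' : List Int) (l : Int),
    (PySem.List.pyRange (pre.length : Int) ((pre.length : Int) + (ds.length : Int)) 1).foldl
      (fun (st : List Int × List Int × Int) j =>
        if PySem.List.pyGetD st.1 j 0 ≤ PySem.List.pyGetD st.2.1 st.2.2 0 then
          (PySem.List.pySetD st.1 j (PySem.List.pyGetD st.2.1 st.2.2 0), st.2.1, st.2.2)
        else
          (st.1, st.2.1 ++ [PySem.List.pyGetD st.1 j 0], st.2.2 + 1))
      (pre ++ ds, r' ++ [l], (r'.length : Int))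
    = (pre ++ runmax l ds, (r' ++ [l]) ++ leaders l ds,
        (r'.length : Int) + ((leaders l ds).length : Int)) := by
  intro ds
  induction ds with
  | nil =>
    intro pre r' l
    rw [PySem.List.pyRange_one_eq_nil (by simp)]
    simp [runmax, leaders]
  | cons d ds ih =>
    intro pre r' l
    have hlt : (pre.length : Int) < (pre.length : Int) + ((d :: ds).length : Int) := by
      simp only [List.length_cons]; push_cast; omega
    rw [PySem.List.pyRange_one_cons hlt, List.foldl_cons]
    have hg1 : PySem.List.pyGetD (pre ++ d :: ds) (pre.length : Int) 0 = d := by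
      rw [PySem.List.pyGetD_natCast, List.getD_append_right _ _ _ _ (le_refl _)]
      simp
    have hg2 : PySem.List.pyGetD (r' ++ [l]) (r'.length : Int) 0 = l := by
      rw [PySem.List.pyGetD_natCast, List.getD_append_right _ _ _ _ (le_refl _)]
      simp
    by_cases hd : d ≤ l
    · have hset : PySem.List.pySetD (pre ++ d :: ds) (pre.length : Int) l = (pre ++ [l]) ++ ds := by
        rw [PySem.List.pySetD_natCast, List.set_append]
        simp [List.set_cons_zero]
      have hstep : (if PySem.List.pyGetD ((pre ++ d :: ds, r' ++ [l], (r'.length : Int)) : List Int × List Int × Int).1 (pre.length : Int) 0 ≤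
            PySem.List.pyGetD (pre ++ d :: ds, r' ++ [l], (r'.length : Int)).2.1 (pre ++ d :: ds, r' ++ [l], (r'.length : Int)).2.2 0 then
            (PySem.List.pySetD (pre ++ d :: ds, r' ++ [l], (r'.length : Int)).1 (pre.length : Int)
              (PySem.List.pyGetD (pre ++ d :: ds, r' ++ [l], (r'.length : Int)).2.1 (pre ++ d :: ds, r' ++ [l], (r'.length : Int)).2.2 0),
              (pre ++ d :: ds, r' ++ [l], (r'.length : Int)).2.1, (pre ++ d :: ds, r' ++ [l], (r'.length : Int)).2.2)
          else
            ((pre ++ d :: ds, r' ++ [l], (r'.length : Int)).1,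
              (pre ++ d :: ds, r' ++ [l], (r'.length : Int)).2.1 ++ [PySem.List.pyGetD (pre ++ d :: ds, r' ++ [l], (r'.length : Int)).1 (pre.length : Int) 0],
              (pre ++ d :: ds, r' ++ [l], (r'.length : Int)).2.2 + 1))
          = ((pre ++ [l]) ++ ds, r' ++ [l], (r'.length : Int)) := by
        simp only [hg1, hg2, hset, if_pos hd]
      rw [hstep]
      have key := ih (pre ++ [l]) r' l
      have e1 : ((pre ++ [l]).length : Int) + ((ds).length : Int)
          = (pre.length : Int) + (((d :: ds)).length : Int) := by
        simp only [List.length_append, List.length_cons, List.length_nil]; push_cast; ring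
      have e2 : ((pre ++ [l]).length : Int) = (pre.length : Int) + 1 := by
        simp only [List.length_append, List.length_cons, List.length_nil]; push_cast; ring
      rw [e1, e2] at key
      rw [key, runmax, if_pos hd, leaders, if_pos hd]
      simp [List.append_assoc]
    · have hstep : (if PySem.List.pyGetD ((pre ++ d :: ds, r' ++ [l], (r'.length : Int)) : List Int × List Int × Int).1 (pre.length : Int) 0 ≤
            PySem.List.pyGetD (pre ++ d :: ds, r' ++ [l], (r'.length : Int)).2.1 (pre ++ d :: ds, r' ++ [l], (r'.length : Int)).2.2 0 then
            (PySem.List.pySetD (pre ++ d :: ds, r' ++ [l], (r'.length : Int)).1 (pre.length : Int)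
              (PySem.List.pyGetD (pre ++ d :: ds, r' ++ [l], (r'.length : Int)).2.1 (pre ++ d :: ds, r' ++ [l], (r'.length : Int)).2.2 0),
              (pre ++ d :: ds, r' ++ [l], (r'.length : Int)).2.1, (pre ++ d :: ds, r' ++ [l], (r'.length : Int)).2.2)
          else
            ((pre ++ d :: ds, r' ++ [l], (r'.length : Int)).1,
              (pre ++ d :: ds, r' ++ [l], (r'.length : Int)).2.1 ++ [PySem.List.pyGetD (pre ++ d :: ds, r' ++ [l], (r'.length : Int)).1 (pre.length : Int) 0],
              (pre ++ d :: ds, r' ++ [l], (r'.length : Int)).2.2 + 1))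
          = ((pre ++ [d]) ++ ds, (r' ++ [l]) ++ [d], ((r' ++ [l]).length : Int)) := by
        simp only [hg1, hg2, if_neg hd]
        simp [List.append_assoc]
      rw [hstep]
      have key := ih (pre ++ [d]) (r' ++ [l]) d
      have e1 : ((pre ++ [d]).length : Int) + ((ds).length : Int)
          = (pre.length : Int) + (((d :: ds)).length : Int) := by
        simp only [List.length_append, List.length_cons, List.length_nil]; push_cast; ring
      have e2 : ((pre ++ [d]).length : Int) = (pre.length : Int) + 1 := by
        simp only [List.length_append, List.length_cons, List.length_nil]; push_cast; ring
      rw [e1, e2] at key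
      rw [key, runmax, if_neg hd, leaders, if_neg hd]
      simp only [Prod.mk.injEq]
      refine ⟨by simp [List.append_assoc], by simp [List.append_assoc], ?_⟩
      simp only [List.length_append, List.length_cons, List.length_nil]
      push_cast; ring

theorem ite_append (c : Prop) [Decidable c] (days : List Int) (x y : Int) :
    (if c then days ++ [x] else days ++ [y]) = days ++ [if c then x else y] := by
  split_ifs <;> rfl

theorem daysA_eq (progresses speeds : List Int) (h : speeds.length ≤ progresses.length) :
    (PySem.List.pyRange 0 (speeds.length : Int) 1).foldl (fun days i =>
        let day := PySem.Int.floordiv (100 - PySem.List.pyGetD progresses i 0) (PySem.List.pyGetD speeds i 0)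
        let dayRest := PySem.Int.mod (100 - PySem.List.pyGetD progresses i 0) (PySem.List.pyGetD speeds i 0)
        if dayRest ≠ 0 then days ++ [day + 1] else days ++ [day]) []
    = (progresses.zip speeds).map (fun ps =>
        PySem.Int.floordiv (100 - ps.1) ps.2 +
          (if PySem.Int.mod (100 - ps.1) ps.2 ≠ 0 then 1 else 0)) := by
  simp only [ite_append, PySem.List.foldl_append_singleton_eq_map, List.nil_append,
    PySem.List.pyRange_zero_nat, List.map_map]
  refine List.ext_getElem ?_ ?_
  · simp only [List.length_map, List.length_range, List.length_zip]
    omega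
  · intro k h1 h2
    simp only [List.length_map, List.length_range] at h1
    simp only [List.getElem_map, List.getElem_range, List.getElem_zip, Function.comp_apply,
      PySem.List.pyGetD_natCast]
    rw [List.getD_eq_getElem progresses 0 (by omega), List.getD_eq_getElem speeds 0 (by omega)]
    split_ifs <;> simp

theorem sor_eq (d0 : Int) (ds : List Int) :
    PySem.List.sorted (PySem.Set.ofList (d0 :: runmax d0 ds)) (fun x => x)
      = d0 :: leaders d0 ds := by
  apply PySem.List.sorted_eq_of_perm_of_pairwise_lt
  · rw [List.perm_ext_iff_of_nodup
      ((pairwise_leaders ds d0).imp (fun hx => ne_of_lt hx))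
      (PySem.Set.nodup_ofList _)]
    intro x
    rw [PySem.Set.mem_ofList]
    simp only [List.mem_cons]
    exact (mem_runmax_leaders ds d0 x).symm
  · exact pairwise_leaders ds d0

-- ===== VERDICT (by name: the statement is the Claim_ definition above) =====
theorem solution_spec : Claim_equal_solution := by
  intro progresses speeds hdom hpre
  obtain ⟨hne, hlen, hnz⟩ := hpre
  unfold Spec_solution
  show solution progresses speeds = solution_alt progresses speeds
  simp only [solution, solution_alt]
  rw [daysA_eq progresses speeds hlen]
  have hnil : (progresses.zip speeds).map (fun ps =>
        PySem.Int.floordiv (100 - ps.1) ps.2 +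
          (if PySem.Int.mod (100 - ps.1) ps.2 ≠ 0 then 1 else 0)) ≠ [] := by
    intro hcon
    have := congrArg List.length hcon
    simp only [List.length_map, List.length_zip, List.length_nil] at this
    have : speeds.length = 0 := by omega
    exact hne (List.length_eq_zero_iff.mp this)
  obtain ⟨d0, ds, hcons⟩ : ∃ d0 ds, (progresses.zip speeds).map (fun ps =>
        PySem.Int.floordiv (100 - ps.1) ps.2 +
          (if PySem.Int.mod (100 - ps.1) ps.2 ≠ 0 then 1 else 0)) = d0 :: ds := by
    rcases h : (progresses.zip speeds).map (fun ps =>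
        PySem.Int.floordiv (100 - ps.1) ps.2 +
          (if PySem.Int.mod (100 - ps.1) ps.2 ≠ 0 then 1 else 0)) with _ | ⟨d0, ds⟩
    · exact absurd h hnil
    · exact ⟨d0, ds, h⟩
  rw [hcons]
  -- A's mutation loop
  have key := loopA_eq ds [d0] [] d0
  simp only [List.length_cons, List.length_nil, List.singleton_append, List.nil_append,
    Nat.cast_one, Nat.cast_zero, zero_add] at key
  have ebound : ((d0 :: ds).length : Int) = 1 + (ds.length : Int) := by
    simp only [List.length_cons]; push_cast; ring
  rw [PySem.List.pyGetD_zero_cons, List.nil_append, ebound, key]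
  dsimp only
  -- A's counting phase
  rw [sor_eq d0 ds, PySem.List.foldl_append_singleton_eq_map, List.nil_append]
  -- B's greedy pass
  rw [foldB_eq, greB, if_pos (le_refl d0), greB_eq, List.nil_append, List.map_cons]
  simp only [PySem.List.count_eq]
  congr 1
  · rw [List.count_cons_self]; push_cast; ring
  · apply List.map_congr_left
    intro m hm
    have := leaders_gt ds d0 m hm
    rw [List.count_cons_of_ne (by omega)]
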